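-- pv_equiv track=rewrite | github.com/Lee-Eun-Ju/Baekjoon | 프로그래머스/lv0/120956. 옹알이 （1）/옹알이 （1）.py | solution
-- ===== SOURCE A (Python) =====
-- import itertools
--
-- def solution(babbling):
--     answer = 0
--     w = ["aya", "ye", "woo", "ma"]
--
--     data = []
--     for i in range(len(w)+1):
--         x =list(itertools.permutations(w,i))
--         for j in range(len(x)):
--             data.append("".join(x[j]))
--
--     for b in babbling:
--         if b in data:
--             answer +=1
--     return answer
-- ===== SOURCE B (Python) =====
-- def _eats(s, used):
--     # consume one known word as a prefix, never reusing a word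
--     if not s:
--         return True
--     for w in ("aya", "ye", "woo", "ma"):
--         if w not in used and s.startswith(w):
--             return _eats(s[len(w):], used | {w})
--     return False
--
-- def solution(babbling):
--     return sum(1 for b in babbling if _eats(b, frozenset()))
-- ===== Notes on version B (the rewrite author's own statement) =====
-- stated objective: alternative
-- what changed: B parses each babbling greedily left-to-right, consuming one of the four words as a prefix at a time and forbidding reuse, instead of precomputing all 65 permutation concatenations and testing list membership.
import Mathlib
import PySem

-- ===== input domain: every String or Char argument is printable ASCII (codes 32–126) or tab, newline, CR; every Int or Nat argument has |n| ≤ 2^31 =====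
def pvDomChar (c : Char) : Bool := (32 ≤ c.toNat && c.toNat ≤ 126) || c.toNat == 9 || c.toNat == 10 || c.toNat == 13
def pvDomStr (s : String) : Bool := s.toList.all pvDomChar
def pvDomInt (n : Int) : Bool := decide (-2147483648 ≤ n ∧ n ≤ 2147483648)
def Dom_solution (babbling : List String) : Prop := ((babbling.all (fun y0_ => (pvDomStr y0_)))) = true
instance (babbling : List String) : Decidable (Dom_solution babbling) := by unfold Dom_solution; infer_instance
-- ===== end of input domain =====

-- B replaces A's "precompute all 65 permutation concatenations, then test list membership"
-- by a greedy left-to-right parse of each babbling (consume one unused word at a time); objective: alternative algorithm, same cost.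

-- ===== PORT A =====
def wordsA : List String := ["aya", "ye", "woo", "ma"]

-- hand port of itertools.permutations(l, r) (the input list has no duplicates)
def permsA : List String → Nat → List (List String)
  | _, 0 => [[]]
  | l, r + 1 => l.flatMap (fun x => (permsA (l.erase x) r).map (fun t => x :: t))

def dataA : List String :=
  (List.range (wordsA.length + 1)).foldl (fun data i =>
    let x := permsA wordsA i
    (List.range x.length).foldl (fun d j => d ++ [PySem.Str.join "" (x.getD j [])]) data) []

def solution (babbling : List String) : Int :=
  babbling.foldl (fun answer b => if b ∈ dataA then answer + 1 else answer) 0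

-- ===== PORT B =====
def wordsB : List (List Char) := [['a','y','a'], ['y','e'], ['w','o','o'], ['m','a']]

-- port of _eats; the fuel argument (started at length+1) only makes the recursion structural
-- and is never exhausted before the string is consumed or the parse fails
def eats : Nat → List Char → List (List Char) → Bool
  | 0, s, _ => s.isEmpty
  | f + 1, s, used =>
    if s.isEmpty then true
    else
      match wordsB.find? (fun w => !used.contains w && w.isPrefixOf s) with
      | some w => eats f (s.drop w.length) (w :: used)
      | none => false

def solution_alt (babbling : List String) : Int :=
  babbling.foldl (fun c b => if eats (b.toList.length + 1) b.toList [] then c + 1 else c) 0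

-- ===== PRECONDITION & SPEC =====
def Spec_solution (babbling : List String) (out : Int) : Prop := out = solution_alt babbling
instance (babbling : List String) (out : Int) : Decidable (Spec_solution babbling out) := by unfold Spec_solution; infer_instance

-- ===== CLAIM (what is proved, stated in full; the proofs are below) =====
def Claim_equal_solution : Prop := ∀ (babbling : List String), Dom_solution babbling → Spec_solution babbling (solution babbling)

-- ===== LEMMAS AND PROOFS =====

lemma dataA_eq : dataA = ["", "aya", "ye", "woo", "ma", "ayaye", "ayawoo", "ayama", "yeaya", "yewoo", "yema", "wooaya", "wooye", "wooma", "maaya", "maye", "mawoo", "ayayewoo", "ayayema", "ayawooye", "ayawooma", "ayamaye", "ayamawoo", "yeayawoo", "yeayama", "yewooaya", "yewooma", "yemaaya", "yemawoo", "wooayaye", "wooayama", "wooyeaya", "wooyema", "woomaaya", "woomaye", "maayaye", "maayawoo", "mayeaya", "mayewoo", "mawooaya", "mawooye", "ayayewooma", "ayayemawoo", "ayawooyema", "ayawoomaye", "ayamayewoo", "ayamawooye", "yeayawooma", "yeayamawoo", "yewooayama", "yewoomaaya", "yemaayawoo", "yemawooaya", "wooayayema", "wooayamaye", "wooyeayama",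 "wooyemaaya", "woomaayaye", "woomayeaya", "maayayewoo", "maayawooye", "mayeayawoo", "mayewooaya", "mawooayaye", "mawooyeaya"] := by decide

lemma mem_imp_eats (s : String) (h : s ∈ dataA) :
    eats (s.toList.length + 1) s.toList [] = true := by
  rw [dataA_eq] at h
  fin_cases h <;> decide

lemma eats_sound : ∀ (f : Nat) (s : List Char) (used : List (List Char)),
    s.length < f → eats f s used = true →
    ∃ ws : List (List Char), ws.Nodup ∧ (∀ x ∈ ws, x ∈ wordsB ∧ x ∉ used) ∧
      s = ws.flatten := by
  intro f
  induction f with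
  | zero => intro s used h; omega
  | succ f ih =>
    intro s used hlen heats
    by_cases hs : s.isEmpty
    · exact ⟨[], by simp, by simp, by simpa [List.isEmpty_iff] using hs⟩
    · rw [eats, if_neg hs] at heats
      rcases hfind : wordsB.find? (fun w => !used.contains w && w.isPrefixOf s) with _ | w
      · rw [hfind] at heats; simp at heats
      · rw [hfind] at heats
        change eats f (s.drop w.length) (w :: used) = true at heats
        have hwmem : w ∈ wordsB := List.mem_of_find?_eq_some hfind
        have hpred := List.find?_some hfind
        simp only [Bool.and_eq_true, Bool.not_eq_true'] at hpred
        obtain ⟨hused, hpre⟩ := hpred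
        have hused' : w ∉ used := by simpa using hused
        have hpre' : w <+: s := by
          simpa [List.isPrefixOf_iff_prefix] using hpre
        have hwlen : 0 < w.length := by fin_cases hwmem <;> decide
        obtain ⟨t, rfl⟩ := hpre'
        rw [List.drop_left] at heats
        have hlt : t.length < f := by
          simp [List.length_append] at hlen; omega
        obtain ⟨ws, hnd, hprop, hflat⟩ := ih t (w :: used) hlt heats
        refine ⟨w :: ws, ?_, ?_, ?_⟩
        · exact List.nodup_cons.2 ⟨fun hmem => (hprop w hmem).2 (List.mem_cons_self ..), hnd⟩
        · intro x hx
          rcases List.mem_cons.1 hx with rfl | hx'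
          · exact ⟨hwmem, hused'⟩
          · exact ⟨(hprop x hx').1, fun hm => (hprop x hx').2 (List.mem_cons_of_mem _ hm)⟩
        · simp [hflat]

lemma join_mem_data : ∀ ws : List (List Char), ws.Nodup → (∀ x ∈ ws, x ∈ wordsB) →
    String.ofList ws.flatten ∈ dataA := by
  intro ws h1 h2
  rcases ws with _ | ⟨a, _ | ⟨b, _ | ⟨c, _ | ⟨d, _ | ⟨e, tl⟩⟩⟩⟩⟩
  · decide
  · have ha := h2 a (by simp)
    simp only [wordsB, List.mem_cons, List.not_mem_nil, or_false] at ha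
    rcases ha with rfl | rfl | rfl | rfl <;> revert h1 <;> decide
  · have ha := h2 a (by simp); have hb := h2 b (by simp)
    simp only [wordsB, List.mem_cons, List.not_mem_nil, or_false] at ha hb
    rcases ha with rfl | rfl | rfl | rfl <;> rcases hb with rfl | rfl | rfl | rfl <;>
      revert h1 <;> decide
  · have ha := h2 a (by simp); have hb := h2 b (by simp); have hc := h2 c (by simp)
    simp only [wordsB, List.mem_cons, List.not_mem_nil, or_false] at ha hb hc
    rcases ha with rfl | rfl | rfl | rfl <;> rcases hb with rfl | rfl | rfl | rfl <;>
      rcases hc with rfl | rfl | rfl | rfl <;> revert h1 <;> decide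
  · have ha := h2 a (by simp); have hb := h2 b (by simp); have hc := h2 c (by simp)
    have hd := h2 d (by simp)
    simp only [wordsB, List.mem_cons, List.not_mem_nil, or_false] at ha hb hc hd
    rcases ha with rfl | rfl | rfl | rfl <;> rcases hb with rfl | rfl | rfl | rfl <;>
      rcases hc with rfl | rfl | rfl | rfl <;> rcases hd with rfl | rfl | rfl | rfl <;>
      revert h1 <;> decide
  · exfalso
    have hsub : (a :: b :: c :: d :: e :: tl) ⊆ wordsB := fun x hx => h2 x hx
    have hle := (List.subperm_of_subset h1 hsub).length_le
    simp [wordsB] at hle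
    omega

lemma mem_iff_eats (s : String) :
    (s ∈ dataA) ↔ eats (s.toList.length + 1) s.toList [] = true := by
  constructor
  · exact mem_imp_eats s
  · intro h
    obtain ⟨ws, hnd, hprop, hflat⟩ := eats_sound _ _ _ (by omega) h
    have := join_mem_data ws hnd (fun x hx => (hprop x hx).1)
    rw [← hflat, String.ofList_toList] at this
    exact this

lemma fold_eq (l : List String) : ∀ acc : Int,
    l.foldl (fun answer b => if b ∈ dataA then answer + 1 else answer) acc =
    l.foldl (fun c b => if eats (b.toList.length + 1) b.toList [] then c + 1 else c) acc := by
  induction l with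
  | nil => intro acc; rfl
  | cons b t ih =>
    intro acc
    simp only [List.foldl_cons]
    have hcond : (if b ∈ dataA then acc + 1 else acc) =
        (if eats (b.toList.length + 1) b.toList [] then acc + 1 else acc) := by
      by_cases h : eats (b.toList.length + 1) b.toList [] = true
      · rw [if_pos ((mem_iff_eats b).2 h), if_pos h]
      · rw [if_neg (fun hm => h ((mem_iff_eats b).1 hm)), if_neg h]
    rw [hcond]
    exact ih _

-- ===== VERDICT (by name: the statement is the Claim_ definition above) =====
theorem solution_spec : Claim_equal_solution := by
  intro babbling _
  unfold Spec_solution solution solution_alt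
  exact fold_eq babbling 0
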